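-- pv_equiv track=rewrite | github.com/VitaliiPolishchuk/knu-cryptography | long_ariphmetic.py | exp2
-- ===== SOURCE A (Python) =====
-- def exp2(e,g,q,n):
--     t = [0,1]
--     sq = g
--     e1 = e
--     while(e1!=0):
--         if (e1%2)==1:
--             t = mult2(sq,t,q,n)
--             e1 = (e1-1)//2
--         else:
--             e1 = e1//2
--         sq = mult2(sq,sq,q,n)
--     return(t)
--
-- def mult2(a,b,q,n):
--     t1 = (a[0]*b[1])%n
--     t2 = (a[1]*b[0])%n
--     t1 = (t1+t2)%n
--     t2 = (a[1]*b[1])%n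
--     t3 = ((n-1)*q[0])%n
--     t4 = ((n-1)*q[1])%n
--     t5 = (a[0]*b[0])%n
--     t3 = (t5*t3)%n
--     t4 = (t5*t4)%n
--     c = [(t1+t3)%n , (t2+t4)%n]
--     return(c)
-- ===== SOURCE B (Python) =====
-- # MSB-first recursive square-and-multiply; mult2 reused unchanged from A's module.
-- def mult2(a,b,q,n):
--     t1 = (a[0]*b[1])%n
--     t2 = (a[1]*b[0])%n
--     t1 = (t1+t2)%n
--     t2 = (a[1]*b[1])%n
--     t3 = ((n-1)*q[0])%n
--     t4 = ((n-1)*q[1])%n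
--     t5 = (a[0]*b[0])%n
--     t3 = (t5*t3)%n
--     t4 = (t5*t4)%n
--     c = [(t1+t3)%n , (t2+t4)%n]
--     return(c)
--
-- def exp2(e,g,q,n):
--     if e == 0:
--         return [0,1]
--     h = exp2(e//2, g, q, n)
--     r = mult2(h, h, q, n)
--     if e % 2 == 1:
--         r = mult2(g, r, q, n)
--     return r
-- ===== Notes on version B (the rewrite author's own statement) =====
-- stated objective: alternative
-- what changed: Replaced the LSB-first accumulator/running-square while-loop by an MSB-first divide-and-conquer recursion (square the result of exp2(e//2), multiply by g when e is odd), reusing mult2 unchanged.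
import Mathlib
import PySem

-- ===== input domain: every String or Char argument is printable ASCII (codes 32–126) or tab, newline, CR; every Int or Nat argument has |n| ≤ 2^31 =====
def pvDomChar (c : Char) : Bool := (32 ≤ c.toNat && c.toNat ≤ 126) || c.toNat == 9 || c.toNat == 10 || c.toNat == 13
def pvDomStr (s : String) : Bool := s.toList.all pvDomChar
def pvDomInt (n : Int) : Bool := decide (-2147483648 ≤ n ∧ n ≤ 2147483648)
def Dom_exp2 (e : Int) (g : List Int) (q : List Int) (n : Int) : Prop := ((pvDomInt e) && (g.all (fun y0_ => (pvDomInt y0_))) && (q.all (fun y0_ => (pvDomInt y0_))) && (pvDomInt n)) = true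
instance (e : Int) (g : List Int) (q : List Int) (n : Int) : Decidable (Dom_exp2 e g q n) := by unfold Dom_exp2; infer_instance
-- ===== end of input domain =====

-- B changes the decomposition: A's LSB-first accumulator loop becomes an MSB-first
-- divide-and-conquer recursion (objective: alternative, same cost); mult2 is shared verbatim.

-- ===== PORT A =====
-- xs[i]: total guard via getD; Pre_ keeps every index used in range, so it is exact there
def getv (a : List Int) (i : Int) : Int := (PySem.List.pyGet? a i).getD 0

-- literal port of the module helper mult2 (identical in A and B, so shared by both ports)
def mult2 (a b q : List Int) (n : Int) : List Int :=
  let t1 := PySem.Int.mod (getv a 0 * getv b 1) n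
  let t2 := PySem.Int.mod (getv a 1 * getv b 0) n
  let t1 := PySem.Int.mod (t1 + t2) n
  let t2 := PySem.Int.mod (getv a 1 * getv b 1) n
  let t3 := PySem.Int.mod ((n - 1) * getv q 0) n
  let t4 := PySem.Int.mod ((n - 1) * getv q 1) n
  let t5 := PySem.Int.mod (getv a 0 * getv b 0) n
  let t3 := PySem.Int.mod (t5 * t3) n
  let t4 := PySem.Int.mod (t5 * t4) n
  [PySem.Int.mod (t1 + t3) n, PySem.Int.mod (t2 + t4) n]

-- A's while-loop; fuel only makes it total (inside Pre_ the loop runs ≤ e1.toNat < fuel steps)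
def exp2Loop (fuel : Nat) (e1 : Int) (t sq : List Int) (q : List Int) (n : Int) : List Int :=
  match fuel with
  | 0 => t
  | fuel + 1 =>
    if e1 = 0 then t
    else if PySem.Int.mod e1 2 = 1 then
      exp2Loop fuel (PySem.Int.floordiv (e1 - 1) 2) (mult2 sq t q n) (mult2 sq sq q n) q n
    else
      exp2Loop fuel (PySem.Int.floordiv e1 2) t (mult2 sq sq q n) q n

def exp2 (e : Int) (g : List Int) (q : List Int) (n : Int) : List Int :=
  exp2Loop (e.toNat + 1) e [0, 1] g q n

-- ===== PORT B =====
-- e ≤ 0 base case: Python B's 'e == 0' plus a totality guard for e < 0 (outside Pre_, where B recurses forever)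
def exp2_alt (e : Int) (g : List Int) (q : List Int) (n : Int) : List Int :=
  if e ≤ 0 then [0, 1]
  else
    let hh := exp2_alt (PySem.Int.floordiv e 2) g q n
    let r := mult2 hh hh q n
    if PySem.Int.mod e 2 = 1 then mult2 g r q n else r
termination_by e.toNat
decreasing_by
  rw [PySem.Int.floordiv_eq_ediv_of_pos (by omega : (0:Int) < 2)]
  omega

-- ===== PRECONDITION & SPEC =====
-- Pre_ is exactly where Python A returns: e ≥ 0 (A loops forever on negative e), and unless
-- e = 0 the loop calls mult2, which raises IndexError on lists shorter than 2 and
-- ZeroDivisionError when n = 0.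
def Pre_exp2 (e : Int) (g : List Int) (q : List Int) (n : Int) : Prop :=
  0 ≤ e ∧ (e = 0 ∨ (n ≠ 0 ∧ 2 ≤ g.length ∧ 2 ≤ q.length))
instance (e : Int) (g : List Int) (q : List Int) (n : Int) : Decidable (Pre_exp2 e g q n) := by
  unfold Pre_exp2; infer_instance
def pvWitness_exp2 : Int × List Int × List Int × Int := (5, [2, 3], [1, 1], 7)

def Spec_exp2 (e : Int) (g : List Int) (q : List Int) (n : Int) (out : List Int) : Prop := out = exp2_alt e g q n
instance (e : Int) (g : List Int) (q : List Int) (n : Int) (out : List Int) : Decidable (Spec_exp2 e g q n out) := by unfold Spec_exp2; infer_instance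

-- ===== CLAIM (what is proved, stated in full; the proofs are below) =====
def Claim_equal_exp2 : Prop := ∀ (e : Int) (g : List Int) (q : List Int) (n : Int), Dom_exp2 e g q n → Pre_exp2 e g q n → Spec_exp2 e g q n (exp2 e g q n)

-- ===== LEMMAS AND PROOFS =====

-- pure (mod-free) multiplication in Z[x]/(x^2 + q.1*x + q.2): pairs (x-coeff, const)
def pmul (qq a b : Int × Int) : Int × Int :=
  (a.1 * b.2 + a.2 * b.1 - a.1 * b.1 * qq.1, a.2 * b.2 - a.1 * b.1 * qq.2)

def ppow (qq a : Int × Int) : Nat → Int × Int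
  | 0 => (0, 1)
  | k + 1 => pmul qq a (ppow qq a k)

-- componentwise reduction of a pure pair
def F (n : Int) (p : Int × Int) : List Int := [PySem.Int.mod p.1 n, PySem.Int.mod p.2 n]

-- a : List Int represents the pure pair p modulo n
def PRep (n : Int) (a : List Int) (p : Int × Int) : Prop :=
  n ∣ (getv a 0 - p.1) ∧ n ∣ (getv a 1 - p.2)

theorem mod_modEq (x n : Int) : PySem.Int.mod x n ≡ x [ZMOD n] := by
  have h := PySem.Int.floordiv_mul_add_mod x n
  exact Int.modEq_iff_dvd.mpr ⟨PySem.Int.floordiv x n, by linarith⟩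

theorem mod_congr {x y n : Int} (hn : n ≠ 0) (h : x ≡ y [ZMOD n]) :
    PySem.Int.mod x n = PySem.Int.mod y n := by
  rcases lt_or_gt_of_ne hn with hneg | hpos
  · have hx := PySem.Int.mod_neg_bounds x hneg
    have hy := PySem.Int.mod_neg_bounds y hneg
    have h1 := ((mod_modEq x n).trans (h.trans (mod_modEq y n).symm)).dvd
    have h2 : -n ∣ (PySem.Int.mod y n - PySem.Int.mod x n) := by
      simpa using (neg_dvd.mpr h1)
    have h3 := Int.eq_zero_of_abs_lt_dvd h2 (abs_lt.mpr ⟨by omega, by omega⟩)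
    omega
  · rw [PySem.Int.mod_eq_emod_of_pos hpos, PySem.Int.mod_eq_emod_of_pos hpos]
    exact h

theorem prep_F (n : Int) (p : Int × Int) : PRep n (F n p) p := by
  constructor
  · simpa [F, getv, PySem.List.pyGet?, PySem.List.pyIdx?] using (mod_modEq p.1 n).symm.dvd
  · simpa [F, getv, PySem.List.pyGet?, PySem.List.pyIdx?] using (mod_modEq p.2 n).symm.dvd

theorem prep_self (n : Int) (a : List Int) : PRep n a (getv a 0, getv a 1) := by
  exact ⟨by simp, by simp⟩

-- the key step: mult2 on representatives is the reduction of the pure product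
theorem mult2_eq_F {n : Int} (hn : n ≠ 0) {a b : List Int} {p s : Int × Int}
    (ha : PRep n a p) (hb : PRep n b s) (q : List Int) :
    mult2 a b q n = F n (pmul (getv q 0, getv q 1) p s) := by
  obtain ⟨ha0, ha1⟩ := ha
  obtain ⟨hb0, hb1⟩ := hb
  have ea0 : getv a 0 ≡ p.1 [ZMOD n] := Int.modEq_iff_dvd.mpr (by simpa using dvd_neg.mpr ha0)
  have ea1 : getv a 1 ≡ p.2 [ZMOD n] := Int.modEq_iff_dvd.mpr (by simpa using dvd_neg.mpr ha1)
  have eb0 : getv b 0 ≡ s.1 [ZMOD n] := Int.modEq_iff_dvd.mpr (by simpa using dvd_neg.mpr hb0)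
  have eb1 : getv b 1 ≡ s.2 [ZMOD n] := Int.modEq_iff_dvd.mpr (by simpa using dvd_neg.mpr hb1)
  have en : (n - 1 : Int) ≡ -1 [ZMOD n] := Int.modEq_iff_dvd.mpr ⟨-1, by ring⟩
  simp only [mult2, F, pmul]
  congr 1
  · apply mod_congr hn
    calc PySem.Int.mod (PySem.Int.mod (getv a 0 * getv b 1) n + PySem.Int.mod (getv a 1 * getv b 0) n) n
          + PySem.Int.mod (PySem.Int.mod (getv a 0 * getv b 0) n * PySem.Int.mod ((n - 1) * getv q 0) n) n
        ≡ (getv a 0 * getv b 1 + getv a 1 * getv b 0)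
          + (getv a 0 * getv b 0) * ((n - 1) * getv q 0) [ZMOD n] := by
          exact Int.ModEq.add ((mod_modEq _ n).trans (Int.ModEq.add (mod_modEq _ n) (mod_modEq _ n)))
            ((mod_modEq _ n).trans (Int.ModEq.mul (mod_modEq _ n) (mod_modEq _ n)))
      _ ≡ (p.1 * s.2 + p.2 * s.1) + (p.1 * s.1) * (-1 * getv q 0) [ZMOD n] := by
          exact Int.ModEq.add (Int.ModEq.add (Int.ModEq.mul ea0 eb1) (Int.ModEq.mul ea1 eb0))
            (Int.ModEq.mul (Int.ModEq.mul ea0 eb0) (Int.ModEq.mul en (Int.ModEq.refl _)))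
      _ = p.1 * s.2 + p.2 * s.1 - p.1 * s.1 * getv q 0 := by ring
  · congr 1
    apply mod_congr hn
    calc PySem.Int.mod (getv a 1 * getv b 1) n
          + PySem.Int.mod (PySem.Int.mod (getv a 0 * getv b 0) n * PySem.Int.mod ((n - 1) * getv q 1) n) n
        ≡ getv a 1 * getv b 1 + (getv a 0 * getv b 0) * ((n - 1) * getv q 1) [ZMOD n] := by
          exact Int.ModEq.add (mod_modEq _ n)
            ((mod_modEq _ n).trans (Int.ModEq.mul (mod_modEq _ n) (mod_modEq _ n)))
      _ ≡ p.2 * s.2 + (p.1 * s.1) * (-1 * getv q 1) [ZMOD n] := by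
          exact Int.ModEq.add (Int.ModEq.mul ea1 eb1)
            (Int.ModEq.mul (Int.ModEq.mul ea0 eb0) (Int.ModEq.mul en (Int.ModEq.refl _)))
      _ = p.2 * s.2 - p.1 * s.1 * getv q 1 := by ring

-- pure algebra
theorem pmul_comm (qq a b : Int × Int) : pmul qq a b = pmul qq b a := by
  simp only [pmul, Prod.mk.injEq]; constructor <;> ring

theorem pmul_assoc (qq a b c : Int × Int) : pmul qq (pmul qq a b) c = pmul qq a (pmul qq b c) := by
  simp only [pmul, Prod.mk.injEq]; constructor <;> ring

theorem pmul_one (qq a : Int × Int) : pmul qq a (0, 1) = a := by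
  simp [pmul]

theorem one_pmul (qq a : Int × Int) : pmul qq (0, 1) a = a := by
  simp [pmul]

theorem ppowAdd (qq a : Int × Int) (i j : Nat) :
    pmul qq (ppow qq a i) (ppow qq a j) = ppow qq a (i + j) := by
  induction i with
  | zero => simp [ppow, one_pmul]
  | succ k ih =>
      rw [show k + 1 + j = (k + j) + 1 from by omega]
      show pmul qq (pmul qq a (ppow qq a k)) (ppow qq a j) = pmul qq a (ppow qq a (k + j))
      rw [pmul_assoc, ih]

theorem ppowSq (qq a : Int × Int) (j : Nat) :
    ppow qq (pmul qq a a) j = ppow qq a (2 * j) := by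
  induction j with
  | zero => rfl
  | succ k ih =>
      show pmul qq (pmul qq a a) (ppow qq (pmul qq a a) k) = ppow qq a (2 * (k + 1))
      rw [ih, show 2 * (k + 1) = 2 + 2 * k from by omega, ← ppowAdd qq a 2 (2 * k)]
      congr 1
      show pmul qq a a = pmul qq a (pmul qq a (0, 1))
      rw [pmul_one]

theorem odd_step (qq p s : Int × Int) (m : Nat) :
    pmul qq (pmul qq s p) (ppow qq s (2 * m)) = pmul qq p (ppow qq s (2 * m + 1)) := by
  rw [pmul_comm qq s p, pmul_assoc]
  rfl

-- B computes the reduction of gp^e (and always represents it)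
theorem exp2_alt_spec (g q : List Int) (n : Int) (hn : n ≠ 0) :
    ∀ k (e : Int), 0 ≤ e → e.toNat = k →
      PRep n (exp2_alt e g q n) (ppow (getv q 0, getv q 1) (getv g 0, getv g 1) e.toNat) ∧
      (0 < e → exp2_alt e g q n =
        F n (ppow (getv q 0, getv q 1) (getv g 0, getv g 1) e.toNat)) := by
  intro k
  induction k using Nat.strong_induction_on with
  | _ k ih =>
    intro e he hk
    by_cases he0 : e ≤ 0
    · have : e = 0 := le_antisymm he0 he
      subst this
      rw [exp2_alt]
      refine ⟨⟨?_, ?_⟩, by omega⟩ <;>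
        simp [ppow, getv, PySem.List.pyGet?, PySem.List.pyIdx?]
    · replace he0 : 0 < e := by omega
      have h2 : PySem.Int.floordiv e 2 = e / 2 :=
        PySem.Int.floordiv_eq_ediv_of_pos (by omega)
      have hlt : (e / 2).toNat < k := by omega
      have h2n : (0:Int) ≤ e / 2 := by omega
      obtain ⟨hrep, _⟩ := ih _ hlt (e / 2) h2n rfl
      have hr : mult2 (exp2_alt (e / 2) g q n) (exp2_alt (e / 2) g q n) q n =
          F n (ppow (getv q 0, getv q 1) (getv g 0, getv g 1) (2 * (e / 2).toNat)) := by
        rw [mult2_eq_F hn hrep hrep q, ppowAdd,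
          show (e / 2).toNat + (e / 2).toNat = 2 * (e / 2).toNat from by omega]
      rw [exp2_alt, if_neg (by omega)]
      simp only [h2, hr]
      have hm2 : PySem.Int.mod e 2 = e % 2 := PySem.Int.mod_eq_emod_of_pos (by omega)
      by_cases hodd : e % 2 = 1
      · rw [if_pos (by rw [hm2]; exact hodd)]
        have hrg : mult2 g (F n (ppow (getv q 0, getv q 1) (getv g 0, getv g 1) (2 * (e / 2).toNat))) q n =
            F n (ppow (getv q 0, getv q 1) (getv g 0, getv g 1) e.toNat) := by
          rw [mult2_eq_F hn (prep_self n g) (prep_F n _) q]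
          have : e.toNat = 2 * (e / 2).toNat + 1 := by omega
          rw [this]
          rfl
        rw [hrg]
        exact ⟨prep_F n _, fun _ => rfl⟩
      · rw [if_neg (by rw [hm2]; exact hodd)]
        have : e.toNat = 2 * (e / 2).toNat := by omega
        rw [← this]
        exact ⟨prep_F n _, fun _ => rfl⟩

-- A's loop invariant
theorem exp2Loop_spec (q : List Int) (n : Int) (hn : n ≠ 0) :
    ∀ (fuel : Nat) (e1 : Int) (t sq : List Int) (p s : Int × Int),
      0 ≤ e1 → e1.toNat < fuel → PRep n t p → PRep n sq s →
      exp2Loop fuel e1 t sq q n =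
        (if e1 = 0 then t
         else F n (pmul (getv q 0, getv q 1) p (ppow (getv q 0, getv q 1) s e1.toNat))) := by
  intro fuel
  induction fuel with
  | zero => intro e1 t sq p s he hf ht hs; omega
  | succ f ih =>
    intro e1 t sq p s he hf ht hs
    by_cases he0 : e1 = 0
    · simp [exp2Loop, he0]
    · rw [if_neg he0]
      have hm2 : PySem.Int.mod e1 2 = e1 % 2 := PySem.Int.mod_eq_emod_of_pos (by omega)
      rw [exp2Loop, if_neg he0]
      by_cases hodd : e1 % 2 = 1
      · rw [if_pos (by rw [hm2]; exact hodd)]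
        have hd : PySem.Int.floordiv (e1 - 1) 2 = (e1 - 1) / 2 :=
          PySem.Int.floordiv_eq_ediv_of_pos (by omega)
        have hsteq : (e1 - 1) / 2 = e1 / 2 := by omega
        rw [hd, hsteq]
        have ht' : PRep n (mult2 sq t q n) (pmul (getv q 0, getv q 1) s p) := by
          rw [mult2_eq_F hn hs ht q]; exact prep_F n _
        have hsq' : PRep n (mult2 sq sq q n) (pmul (getv q 0, getv q 1) s s) := by
          rw [mult2_eq_F hn hs hs q]; exact prep_F n _
        rw [ih (e1 / 2) _ _ _ _ (by omega) (by omega) ht' hsq']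
        by_cases hz : e1 / 2 = 0
        · rw [if_pos hz]
          have h1 : e1 = 1 := by omega
          subst h1
          rw [mult2_eq_F hn hs ht q]
          congr 1
          have hp1 : ppow (getv q 0, getv q 1) s (1:Int).toNat = s := by
            show pmul (getv q 0, getv q 1) s (ppow (getv q 0, getv q 1) s 0) = s
            rw [show ppow (getv q 0, getv q 1) s 0 = (0, 1) from rfl, pmul_one]
          rw [hp1, pmul_comm]
        · rw [if_neg hz]
          congr 1
          rw [ppowSq, odd_step,
            show 2 * (e1 / 2).toNat + 1 = e1.toNat from by omega]
      · rw [if_neg (by rw [hm2]; exact hodd)]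
        have hd : PySem.Int.floordiv e1 2 = e1 / 2 :=
          PySem.Int.floordiv_eq_ediv_of_pos (by omega)
        rw [hd]
        have hsq' : PRep n (mult2 sq sq q n) (pmul (getv q 0, getv q 1) s s) := by
          rw [mult2_eq_F hn hs hs q]; exact prep_F n _
        rw [ih (e1 / 2) _ _ _ _ (by omega) (by omega) ht hsq']
        rw [if_neg (by omega)]
        congr 2
        rw [ppowSq]
        congr 1
        omega

theorem prep_one (n : Int) : PRep n [0, 1] (0, 1) := by
  exact ⟨by simp [getv, PySem.List.pyGet?, PySem.List.pyIdx?],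
    by simp [getv, PySem.List.pyGet?, PySem.List.pyIdx?]⟩

-- ===== VERDICT (by name: the statement is the Claim_ definition above) =====
theorem exp2_spec : Claim_equal_exp2 := by
  intro e g q n _ hpre
  obtain ⟨he, hcase⟩ := hpre
  by_cases he0 : e = 0
  · subst he0
    show exp2 0 g q n = exp2_alt 0 g q n
    rw [exp2, exp2_alt]
    simp [exp2Loop]
  · have hn : n ≠ 0 := by
      rcases hcase with h | h
      · exact absurd h he0
      · exact h.1
    show exp2 e g q n = exp2_alt e g q n
    rw [exp2]
    rw [exp2Loop_spec q n hn (e.toNat + 1) e [0,1] g (0,1) (getv g 0, getv g 1)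
      he (by omega) (prep_one n) (prep_self n g)]
    rw [if_neg he0]
    obtain ⟨_, hB⟩ := exp2_alt_spec g q n hn e.toNat e he rfl
    rw [hB (by omega)]
    rw [one_pmul]
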